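-- pv_equiv track=rewrite | github.com/pypi-data/pypi-mirror-377 | packages/talk-box/talk_box-0.5.0.tar.gz/talk_box-0.5.0/talk_box/testing.py | _parse_scenarios
-- ===== SOURCE A (Python) =====
-- from typing import Any, Dict, List, Optional
--
-- def _parse_scenarios(response: str) -> List[str]:
--     """Parse generated scenarios from bot response."""
--     scenarios = []
--     current_scenario = []
--
--     for line in response.split("\n"):
--         line = line.strip()
--         if line.startswith("SCENARIO"):
--             if current_scenario:
--                 scenarios.append("\n".join(current_scenario))
--             current_scenario = [line]
--         elif line and current_scenario:
--             current_scenario.append(line)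
--
--     if current_scenario:
--         scenarios.append("\n".join(current_scenario))
--
--     return scenarios
-- ===== SOURCE B (Python) =====
-- from typing import List
--
-- def _parse_scenarios(response: str) -> List[str]:
--     """Parse generated scenarios from bot response (block-splitting rewrite)."""
--     lines = [l.strip() for l in response.split("\n")]
--     # drop everything before the first SCENARIO marker
--     i = 0
--     while i < len(lines) and not lines[i].startswith("SCENARIO"):
--         i += 1
--     ls = lines[i:]
--     blocks = []
--     while ls:
--         # ls[0] is a marker; find the end of this block
--         k = 1
--         while k < len(ls) and not ls[k].startswith("SCENARIO"):
--             k += 1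
--         body = [l for l in ls[1:k] if l]
--         blocks.append("\n".join([ls[0]] + body))
--         ls = ls[k:]
--     return blocks
-- ===== Notes on version B (the rewrite author's own statement) =====
-- stated objective: alternative
-- what changed: Replaces A's single fold that maintains a running current_scenario accumulator with a two-phase block-splitting pass: strip all lines once, drop the prefix before the first SCENARIO marker, then repeatedly scan to the next marker and slice out each block.
import Mathlib
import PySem

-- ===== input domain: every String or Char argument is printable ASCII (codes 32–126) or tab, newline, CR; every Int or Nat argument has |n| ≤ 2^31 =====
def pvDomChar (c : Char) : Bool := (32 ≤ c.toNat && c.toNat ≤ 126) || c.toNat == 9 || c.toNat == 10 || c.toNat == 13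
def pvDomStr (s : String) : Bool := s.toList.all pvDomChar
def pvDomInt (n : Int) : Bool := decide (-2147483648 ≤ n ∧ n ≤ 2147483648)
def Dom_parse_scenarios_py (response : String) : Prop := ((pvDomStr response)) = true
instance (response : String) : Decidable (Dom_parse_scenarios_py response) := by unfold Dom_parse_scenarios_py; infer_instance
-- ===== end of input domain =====

-- B replaces A's running-accumulator fold with a two-phase block-splitting pass (strip all
-- lines, drop the prefix before the first marker, then slice out marker-to-marker blocks);
-- objective: alternative decomposition, same cost.

-- ===== PORT A =====
-- flush: exactly A's "if current_scenario: scenarios.append('\n'.join(current_scenario))"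
def pvFlushA (s : List String × List String) : List String :=
  if s.2.isEmpty then s.1 else s.1 ++ [PySem.Str.join "\n" s.2]

-- A's loop body after "line = line.strip()"
def pvStepCore (s : List String × List String) (line : String) : List String × List String :=
  if PySem.Str.startswith line "SCENARIO" then
    (pvFlushA s, [line])
  else if line != "" && !s.2.isEmpty then
    (s.1, s.2 ++ [line])
  else s

-- sep is the literal "\n" ≠ "", so split? is always `some`
def parse_scenarios_py (response : String) : List String :=
  pvFlushA (((PySem.Str.split? response "\n").getD []).foldl
      (fun s line => pvStepCore s (PySem.Str.strip line)) ([], []))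

-- ===== PORT B =====
def pvNotMark (l : String) : Bool := !(PySem.Str.startswith l "SCENARIO")

-- the inner while loop of B: ls[0] is a marker, scan to the next marker, slice the block out
def pvSpanGo : List String → List String
  | [] => []
  | l :: ls =>
      PySem.Str.join "\n" (l :: (ls.takeWhile pvNotMark).filter (fun x => x != ""))
        :: pvSpanGo (ls.dropWhile pvNotMark)
termination_by ls => ls.length
decreasing_by
  exact Nat.lt_succ_of_le (List.length_dropWhile_le _ _)

def parse_scenarios_py_alt (response : String) : List String :=
  pvSpanGo (((((PySem.Str.split? response "\n").getD []).map PySem.Str.strip)).dropWhile pvNotMark)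

-- ===== PRECONDITION & SPEC =====
def Spec_parse_scenarios_py (response : String) (out : List String) : Prop := out = parse_scenarios_py_alt response
instance (response : String) (out : List String) : Decidable (Spec_parse_scenarios_py response out) := by unfold Spec_parse_scenarios_py; infer_instance

-- ===== CLAIM (what is proved, stated in full; the proofs are below) =====
def Claim_equal_parse_scenarios_py : Prop := ∀ (response : String), Dom_parse_scenarios_py response → Spec_parse_scenarios_py response (parse_scenarios_py response)

-- ===== LEMMAS AND PROOFS =====
lemma pvSpanGo_cons (l : String) (ls : List String) :
    pvSpanGo (l :: ls) =
      PySem.Str.join "\n" (l :: (ls.takeWhile pvNotMark).filter (fun x => x != ""))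
        :: pvSpanGo (ls.dropWhile pvNotMark) := by
  rw [pvSpanGo]

-- invariant for a nonempty current scenario m :: body
lemma pvL2 (ls : List String) : ∀ (scs : List String) (m : String) (body : List String),
    pvFlushA (ls.foldl pvStepCore (scs, m :: body)) =
      scs ++ (PySem.Str.join "\n"
          (m :: (body ++ (ls.takeWhile pvNotMark).filter (fun x => x != "")))
        :: pvSpanGo (ls.dropWhile pvNotMark)) := by
  induction ls with
  | nil =>
      intro scs m body
      simp [pvFlushA, pvSpanGo]
  | cons l ls ih =>
      intro scs m body
      by_cases hm : PySem.Str.startswith l "SCENARIO" = true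
      · simp at hm
        have hstep : pvStepCore (scs, m :: body) l =
            (scs ++ [PySem.Str.join "\n" (m :: body)], [l]) := by
          simp [pvStepCore, pvFlushA, hm]
        have hnot : pvNotMark l = false := by simp [pvNotMark, hm]
        simp only [List.foldl_cons, hstep, ih]
        simp [hnot, pvSpanGo_cons]
      · simp at hm
        have hnot : pvNotMark l = true := by simp [pvNotMark, hm]
        by_cases he : l = ""
        · subst he
          have hsw : PySem.Chars.startswith ([] : List Char) ['S','C','E','N','A','R','I','O'] = false := by decide
          have hstep : pvStepCore (scs, m :: body) "" = (scs, m :: body) := by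
            simp [pvStepCore, hsw]
          simp only [List.foldl_cons, hstep, ih]
          simp [hnot]
        · have hstep : pvStepCore (scs, m :: body) l = (scs, m :: (body ++ [l])) := by
            simp [pvStepCore, hm, he]
          simp only [List.foldl_cons, hstep, ih]
          simp [hnot, he]

-- empty current scenario: the result is the blocks of the remaining suffix
lemma pvL1 (ls : List String) : ∀ (scs : List String),
    pvFlushA (ls.foldl pvStepCore (scs, [])) =
      scs ++ pvSpanGo (ls.dropWhile pvNotMark) := by
  induction ls with
  | nil => intro scs; simp [pvFlushA, pvSpanGo]
  | cons l ls ih =>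
      intro scs
      by_cases hm : PySem.Str.startswith l "SCENARIO" = true
      · simp at hm
        have hstep : pvStepCore (scs, ([] : List String)) l = (scs, [l]) := by
          simp [pvStepCore, pvFlushA, hm]
        have hnot : pvNotMark l = false := by simp [pvNotMark, hm]
        simp only [List.foldl_cons, hstep, pvL2 ls scs l []]
        simp [hnot, pvSpanGo_cons]
      · simp at hm
        have hstep : pvStepCore (scs, ([] : List String)) l = (scs, []) := by
          simp [pvStepCore, hm]
        have hnot : pvNotMark l = true := by simp [pvNotMark, hm]
        simp only [List.foldl_cons, hstep, ih]
        simp [hnot]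

-- ===== VERDICT (by name: the statement is the Claim_ definition above) =====
theorem parse_scenarios_py_spec : Claim_equal_parse_scenarios_py := by
  intro response _
  show parse_scenarios_py response = parse_scenarios_py_alt response
  unfold parse_scenarios_py parse_scenarios_py_alt
  rw [← List.foldl_map]
  simpa using pvL1 (((PySem.Str.split? response "\n").getD []).map PySem.Str.strip) []
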